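-- pv_equiv track=rewrite | github.com/gp-learning/Python_educative_assignment | nth_highest_key_value.py | nth_max
-- ===== SOURCE A (Python) =====
-- def nth_max(dict,n):
--     vals = list(dict.values())
--     vals_sorted = sorted(set(vals), reverse =True)
--     nth_max = vals_sorted[n-1]
--     nth_kys = []
--     for k,v in dict.items():
--         if v == nth_max:
--             nth_kys.append(k)
--     return {min(nth_kys):nth_max}
-- ===== SOURCE B (Python) =====
-- def nth_max(dict, n):
--     # one pass: value -> smallest key holding it
--     idx = {}
--     for k, v in dict.items():
--         if v not in idx or k < idx[v]:
--             idx[v] = k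
--     nth = sorted(idx, reverse=True)[n - 1]
--     return {idx[nth]: nth}
-- ===== Notes on version B (the rewrite author's own statement) =====
-- stated objective: simpler
-- what changed: B builds in one pass a value-to-smallest-key index instead of sorting the distinct values and then re-scanning all items for matches and taking min over the collected keys.
import Mathlib
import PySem

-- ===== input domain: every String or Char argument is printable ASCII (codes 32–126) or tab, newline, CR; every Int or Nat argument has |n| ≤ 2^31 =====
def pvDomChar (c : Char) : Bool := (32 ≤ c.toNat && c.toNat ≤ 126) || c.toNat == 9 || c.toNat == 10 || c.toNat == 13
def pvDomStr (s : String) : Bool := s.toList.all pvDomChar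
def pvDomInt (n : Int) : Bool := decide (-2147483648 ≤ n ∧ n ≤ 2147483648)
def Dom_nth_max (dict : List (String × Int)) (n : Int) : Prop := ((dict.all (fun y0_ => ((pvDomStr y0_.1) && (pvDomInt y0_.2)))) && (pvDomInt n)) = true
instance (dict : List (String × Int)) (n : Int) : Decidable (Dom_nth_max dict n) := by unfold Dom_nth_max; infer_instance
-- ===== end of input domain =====

-- B replaces A's sort-then-rescan-then-min with a single pass building a value→smallest-key index (objective: simpler).


-- ===== PORT A =====
def nth_max (dict : List (String × Int)) (n : Int) : List (String × Int) :=
  -- vals = dict.values(); vals_sorted = sorted(set(vals), reverse=True); vals_sorted[n-1]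
  match PySem.List.pyGet?
      (PySem.List.sorted (PySem.Set.ofList (dict.map (·.2))) (fun x => x) true) (n - 1) with
  | none => []  -- IndexError: excluded by Pre_nth_max
  | some nthMax =>
    -- nth_kys: the append loop over dict.items(); then {min(nth_kys): nth_max}
    match PySem.List.min?
        (dict.foldl (fun acc kv => if kv.2 = nthMax then acc ++ [kv.1] else acc) [])
        (fun x => x) with
    | none => []  -- ValueError on min([]): unreachable when indexing succeeded
    | some m => [(m, nthMax)]

-- ===== PORT B =====
-- the one-pass loop of Source B: idx[v] = smallest key seen with value v
def pvBuildIdx (l : List (String × Int)) (d : PySem.Dict Int String) : PySem.Dict Int String :=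
  l.foldl (fun d kv =>
    match d.get? kv.2 with
    | none => d.insert kv.2 kv.1
    | some k0 => if kv.1 < k0 then d.insert kv.2 kv.1 else d) d

def nth_max_alt (dict : List (String × Int)) (n : Int) : List (String × Int) :=
  -- nth = sorted(idx, reverse=True)[n-1]; return {idx[nth]: nth}
  match PySem.List.pyGet?
      (PySem.List.sorted (pvBuildIdx dict PySem.Dict.empty).keys (fun x => x) true) (n - 1) with
  | none => []  -- IndexError: excluded by Pre_nth_max
  | some nth =>
    match (pvBuildIdx dict PySem.Dict.empty).get? nth with
    | none => []  -- unreachable: nth is a key of idx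
    | some k => [(k, nth)]

-- ===== PRECONDITION & SPEC =====
-- Pre_ excludes exactly the inputs where A raises: n-1 must be a valid Python index
-- into the list of distinct values (IndexError otherwise, including the empty dict).
def Pre_nth_max (dict : List (String × Int)) (n : Int) : Prop :=
  PySem.Raise.InRange (PySem.Set.ofList (dict.map (·.2))).length (n - 1)
instance (dict : List (String × Int)) (n : Int) : Decidable (Pre_nth_max dict n) := by
  unfold Pre_nth_max; infer_instance

def pvWitness_nth_max : (List (String × Int)) × Int := ([("a", 3), ("b", 1), ("c", 3)], 2)

def Spec_nth_max (dict : List (String × Int)) (n : Int) (out : List (String × Int)) : Prop := out = nth_max_alt dict n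
instance (dict : List (String × Int)) (n : Int) (out : List (String × Int)) : Decidable (Spec_nth_max dict n out) := by unfold Spec_nth_max; infer_instance

-- ===== CLAIM (what is proved, stated in full; the proofs are below) =====
def Claim_equal_nth_max : Prop := ∀ (dict : List (String × Int)) (n : Int), Dom_nth_max dict n → Pre_nth_max dict n → Spec_nth_max dict n (nth_max dict n)

-- ===== LEMMAS AND PROOFS =====

-- running minimum over an option accumulator (what B's branch does at one fixed value v)
def pvStep (cur : Option String) (k : String) : Option String :=
  match cur with
  | none => some k
  | some k0 => if k < k0 then some k else some k0

theorem pvBuildIdx_get? (l : List (String × Int)) (d : PySem.Dict Int String) (v : Int) :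
    (pvBuildIdx l d).get? v
      = l.foldl (fun cur kv => if kv.2 = v then pvStep cur kv.1 else cur) (d.get? v) := by
  induction l generalizing d with
  | nil => rfl
  | cons kv t ih =>
    simp only [pvBuildIdx, List.foldl_cons] at *
    by_cases hv : kv.2 = v
    · subst hv
      cases h : d.get? kv.2 with
      | none =>
        rw [ih, PySem.Dict.get?_insert_self]
        simp [pvStep]
      | some k0 =>
        dsimp only
        by_cases hlt : kv.1 < k0
        · rw [if_pos hlt, ih, PySem.Dict.get?_insert_self]
          simp [pvStep, hlt]
        · rw [if_neg hlt, ih, h]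
          simp [pvStep, hlt]
    · cases h : d.get? kv.2 with
      | none =>
        simp only [if_neg hv]
        rw [ih, PySem.Dict.get?_insert, if_neg (fun he => hv (Eq.symm he))]
      | some k0 =>
        dsimp only
        by_cases hlt : kv.1 < k0
        · simp only [if_pos hlt, if_neg hv]
          rw [ih, PySem.Dict.get?_insert, if_neg (fun he => hv (Eq.symm he))]
        · simp only [if_neg hlt, if_neg hv]
          rw [ih]

theorem pvBuildIdx_keys (l : List (String × Int)) (d : PySem.Dict Int String) :
    (pvBuildIdx l d).keys = PySem.Set.update d.keys (l.map (·.2)) := by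
  induction l generalizing d with
  | nil => rfl
  | cons kv t ih =>
    simp only [pvBuildIdx, List.foldl_cons, List.map_cons, PySem.Set.update, List.foldl_cons] at *
    cases h : d.get? kv.2 with
    | none =>
      have hc : d.contains kv.2 = false := by
        rw [PySem.Dict.get?_eq_none_iff_contains] at h; exact h
      have hnm : kv.2 ∉ d.keys := fun hmem => by
        rw [← PySem.Dict.contains_iff_mem_keys] at hmem
        simp [hmem] at hc
      rw [ih, PySem.Dict.keys_insert_of_not_contains _ _ hc]
      have : PySem.Set.add d.keys kv.2 = d.keys ++ [kv.2] := by
        simp [PySem.Set.add, PySem.Set.contains, hnm]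
      rw [this]
    | some k0 =>
      dsimp only
      have hc : d.contains kv.2 = true := by
        have := PySem.Dict.contains_eq_isSome_get? d kv.2
        rw [h] at this; simpa using this
      have hmem : kv.2 ∈ d.keys := (PySem.Dict.contains_iff_mem_keys d kv.2).mp hc
      have hadd : PySem.Set.add d.keys kv.2 = d.keys := by
        simp [PySem.Set.add, PySem.Set.contains, hmem]
      by_cases hlt : kv.1 < k0
      · rw [if_pos hlt, ih, PySem.Dict.keys_insert_of_contains _ _ hc, hadd]
      · rw [if_neg hlt, ih, hadd]

-- folding pvStep from none computes Python's min (first minimal element) of the list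
theorem pvStep_foldl_some (t : List String) : ∀ (x : String),
    t.foldl pvStep (some x) = some (t.foldl min x) := by
  induction t with
  | nil => intro x; rfl
  | cons y s ih =>
    intro x
    simp only [List.foldl_cons, pvStep]
    by_cases h : y < x
    · rw [if_pos h, ih, min_eq_right h.le]
    · rw [if_neg h, ih, min_eq_left (not_lt.mp h)]

theorem pvStep_foldl_min (ys : List String) :
    ys.foldl pvStep none = PySem.List.min? ys (fun x => x) := by
  cases ys with
  | nil => rfl
  | cons x t =>
    rw [PySem.List.min?_id_cons]
    simp only [List.foldl_cons, pvStep]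
    exact pvStep_foldl_some t x

theorem pvStep_foldl_filter (l : List (String × Int)) (v : Int) : ∀ (c : Option String),
    l.foldl (fun cur kv => if kv.2 = v then pvStep cur kv.1 else cur) c
      = ((l.filter (fun kv => decide (kv.2 = v))).map (·.1)).foldl pvStep c := by
  induction l with
  | nil => intro c; rfl
  | cons kv t ih =>
    intro c
    by_cases hv : kv.2 = v
    · simp [List.foldl_cons, hv, ih]
    · simp [List.foldl_cons, hv, ih]

-- A's collected key list is the filtered projection
theorem nth_kys_eq (dict : List (String × Int)) (m : Int) : ∀ (acc : List String),
    dict.foldl (fun acc kv => if kv.2 = m then acc ++ [kv.1] else acc) acc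
      = acc ++ (dict.filter (fun kv => decide (kv.2 = m))).map (·.1) := by
  induction dict with
  | nil => intro acc; simp
  | cons kv t ih =>
    intro acc
    by_cases hv : kv.2 = m
    · simp [List.foldl_cons, hv, ih]
    · simp [List.foldl_cons, hv, ih]

-- main value lemma: B's index lookup = min of A's matching-key list
theorem idx_get?_eq_min (dict : List (String × Int)) (v : Int) :
    (pvBuildIdx dict PySem.Dict.empty).get? v
      = PySem.List.min? ((dict.filter (fun kv => decide (kv.2 = v))).map (·.1)) (fun x => x) := by
  rw [pvBuildIdx_get?, PySem.Dict.get?_empty, pvStep_foldl_filter, pvStep_foldl_min]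

theorem idx_keys_eq (dict : List (String × Int)) :
    (pvBuildIdx dict PySem.Dict.empty).keys = PySem.Set.ofList (dict.map (·.2)) := by
  rw [pvBuildIdx_keys]
  simp [PySem.Set.update, PySem.Set.ofList_eq_foldl, PySem.Dict.keys_empty]

-- ===== VERDICT (by name: the statement is the Claim_ definition above) =====
theorem nth_max_spec : Claim_equal_nth_max := by
  intro dict n _hD _hPre
  unfold Spec_nth_max nth_max nth_max_alt
  rw [idx_keys_eq]
  cases hg : PySem.List.pyGet?
      (PySem.List.sorted (PySem.Set.ofList (dict.map (·.2))) (fun x => x) true) (n - 1) with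
  | none => rfl
  | some m =>
    dsimp only
    rw [idx_get?_eq_min, nth_kys_eq]
    simp
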